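-- pv_equiv track=rewrite | github.com/fmenti/life_td | data_generation/life_td_data_generation/provider/exo.py | betterthan
-- ===== SOURCE A (Python) =====
-- def betterthan(qual1: str, qual2: str) -> bool:
--     """
--     Compare Exo-MerCat/DB quality flags.
--
--     Returns True if qual1 is strictly better than qual2 according to
--     the order A > B > C > D > E > ?.
--
--     :param qual1: Candidate quality flag.
--     :type qual1: str
--     :param qual2: Other quality flag.
--     :type qual2: str
--     :returns: True if qual1 ranks better than qual2, else False.
--     :rtype: bool
--     """
--     quals = ["A", "B", "C", "D", "E", "?"]
--     for i in [0, 1, 2, 3, 4]: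
--         if qual1 == quals[i] and qual2 in quals[i + 1 :]:
--             result = True
--             return result
--         else:
--             result = False
--     return result
-- ===== SOURCE B (Python) =====
-- def betterthan(qual1: str, qual2: str) -> bool:
--     order = {"A": 0, "B": 1, "C": 2, "D": 3, "E": 4, "?": 5}
--     return qual1 in order and qual2 in order and order[qual1] < order[qual2]
-- ===== Notes on version B (the rewrite author's own statement) =====
-- stated objective: simpler
-- what changed: Replaces the indexed position-search loop with slice membership tests by a single rank table lookup and one integer comparison.
import Mathlib
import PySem

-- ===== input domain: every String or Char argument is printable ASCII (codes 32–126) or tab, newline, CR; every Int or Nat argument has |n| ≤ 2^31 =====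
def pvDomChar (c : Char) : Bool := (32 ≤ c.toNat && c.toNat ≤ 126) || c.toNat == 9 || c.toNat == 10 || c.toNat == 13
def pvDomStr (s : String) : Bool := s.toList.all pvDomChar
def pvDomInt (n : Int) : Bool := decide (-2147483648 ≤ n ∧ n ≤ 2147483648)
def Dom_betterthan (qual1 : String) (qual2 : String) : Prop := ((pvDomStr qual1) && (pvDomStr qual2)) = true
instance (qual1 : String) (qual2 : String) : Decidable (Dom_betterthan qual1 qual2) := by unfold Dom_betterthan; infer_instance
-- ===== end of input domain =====

-- B replaces A's position-search loop with slice membership by one rank-table lookup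
-- and an integer comparison (objective: simpler).

-- ===== PORT A =====
def betterthanQuals : List String := ["A", "B", "C", "D", "E", "?"]

def betterthanLoop (qual1 qual2 : String) (result : Bool) : List Int → Bool
  | [] => result
  | i :: rest =>
      if qual1 = PySem.List.pyGetD betterthanQuals i "" ∧
         qual2 ∈ PySem.List.slice betterthanQuals (some (i + 1)) none then
        true
      else
        betterthanLoop qual1 qual2 false rest

def betterthan (qual1 : String) (qual2 : String) : Bool :=
  betterthanLoop qual1 qual2 false [0, 1, 2, 3, 4]

-- ===== PORT B =====
def betterthanOrder : PySem.Dict String Int :=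
  PySem.Dict.mk [("A", 0), ("B", 1), ("C", 2), ("D", 3), ("E", 4), ("?", 5)]

def betterthan_alt (qual1 : String) (qual2 : String) : Bool :=
  if betterthanOrder.contains qual1 then
    if betterthanOrder.contains qual2 then
      decide ((betterthanOrder.get? qual1).getD 0 < (betterthanOrder.get? qual2).getD 0)
    else false
  else false

-- ===== PRECONDITION & SPEC =====
def Spec_betterthan (qual1 : String) (qual2 : String) (out : Bool) : Prop := out = betterthan_alt qual1 qual2
instance (qual1 : String) (qual2 : String) (out : Bool) : Decidable (Spec_betterthan qual1 qual2 out) := by unfold Spec_betterthan; infer_instance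

-- ===== CLAIM (what is proved, stated in full; the proofs are below) =====
def Claim_equal_betterthan : Prop := ∀ (qual1 : String) (qual2 : String), Dom_betterthan qual1 qual2 → Spec_betterthan qual1 qual2 (betterthan qual1 qual2)

-- ===== LEMMAS AND PROOFS =====
theorem betterthan_eq (q1 q2 : String) : betterthan q1 q2 = betterthan_alt q1 q2 := by
  rcases eq_or_ne q1 "A" with rfl | hA1
  · rcases eq_or_ne q2 "A" with rfl | hA2
    · decide
    rcases eq_or_ne q2 "B" with rfl | hB2
    · decide
    rcases eq_or_ne q2 "C" with rfl | hC2
    · decide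
    rcases eq_or_ne q2 "D" with rfl | hD2
    · decide
    rcases eq_or_ne q2 "E" with rfl | hE2
    · decide
    rcases eq_or_ne q2 "?" with rfl | hQ2
    · decide
    simp [betterthan, betterthanLoop, betterthanQuals, betterthan_alt, betterthanOrder,
          PySem.List.pyGetD, PySem.List.pyGet?, PySem.List.pyIdx?, PySem.List.slice, PySem.List.clampIdx,
          PySem.Dict.contains, PySem.Dict.get?, List.find?, hA2, Ne.symm hA2, hB2, Ne.symm hB2, hC2, Ne.symm hC2, hD2, Ne.symm hD2, hE2, Ne.symm hE2, hQ2, Ne.symm hQ2]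
  rcases eq_or_ne q1 "B" with rfl | hB1
  · rcases eq_or_ne q2 "A" with rfl | hA2
    · decide
    rcases eq_or_ne q2 "B" with rfl | hB2
    · decide
    rcases eq_or_ne q2 "C" with rfl | hC2
    · decide
    rcases eq_or_ne q2 "D" with rfl | hD2
    · decide
    rcases eq_or_ne q2 "E" with rfl | hE2
    · decide
    rcases eq_or_ne q2 "?" with rfl | hQ2
    · decide
    simp [betterthan, betterthanLoop, betterthanQuals, betterthan_alt, betterthanOrder,
          PySem.List.pyGetD, PySem.List.pyGet?, PySem.List.pyIdx?, PySem.List.slice, PySem.List.clampIdx,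
          PySem.Dict.contains, PySem.Dict.get?, List.find?, hA2, Ne.symm hA2, hB2, Ne.symm hB2, hC2, Ne.symm hC2, hD2, Ne.symm hD2, hE2, Ne.symm hE2, hQ2, Ne.symm hQ2]
  rcases eq_or_ne q1 "C" with rfl | hC1
  · rcases eq_or_ne q2 "A" with rfl | hA2
    · decide
    rcases eq_or_ne q2 "B" with rfl | hB2
    · decide
    rcases eq_or_ne q2 "C" with rfl | hC2
    · decide
    rcases eq_or_ne q2 "D" with rfl | hD2
    · decide
    rcases eq_or_ne q2 "E" with rfl | hE2
    · decide
    rcases eq_or_ne q2 "?" with rfl | hQ2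
    · decide
    simp [betterthan, betterthanLoop, betterthanQuals, betterthan_alt, betterthanOrder,
          PySem.List.pyGetD, PySem.List.pyGet?, PySem.List.pyIdx?, PySem.List.slice, PySem.List.clampIdx,
          PySem.Dict.contains, PySem.Dict.get?, List.find?, hA2, Ne.symm hA2, hB2, Ne.symm hB2, hC2, Ne.symm hC2, hD2, Ne.symm hD2, hE2, Ne.symm hE2, hQ2, Ne.symm hQ2]
  rcases eq_or_ne q1 "D" with rfl | hD1
  · rcases eq_or_ne q2 "A" with rfl | hA2
    · decide
    rcases eq_or_ne q2 "B" with rfl | hB2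
    · decide
    rcases eq_or_ne q2 "C" with rfl | hC2
    · decide
    rcases eq_or_ne q2 "D" with rfl | hD2
    · decide
    rcases eq_or_ne q2 "E" with rfl | hE2
    · decide
    rcases eq_or_ne q2 "?" with rfl | hQ2
    · decide
    simp [betterthan, betterthanLoop, betterthanQuals, betterthan_alt, betterthanOrder,
          PySem.List.pyGetD, PySem.List.pyGet?, PySem.List.pyIdx?, PySem.List.slice, PySem.List.clampIdx,
          PySem.Dict.contains, PySem.Dict.get?, List.find?, hA2, Ne.symm hA2, hB2, Ne.symm hB2, hC2, Ne.symm hC2, hD2, Ne.symm hD2, hE2, Ne.symm hE2, hQ2, Ne.symm hQ2]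
  rcases eq_or_ne q1 "E" with rfl | hE1
  · rcases eq_or_ne q2 "A" with rfl | hA2
    · decide
    rcases eq_or_ne q2 "B" with rfl | hB2
    · decide
    rcases eq_or_ne q2 "C" with rfl | hC2
    · decide
    rcases eq_or_ne q2 "D" with rfl | hD2
    · decide
    rcases eq_or_ne q2 "E" with rfl | hE2
    · decide
    rcases eq_or_ne q2 "?" with rfl | hQ2
    · decide
    simp [betterthan, betterthanLoop, betterthanQuals, betterthan_alt, betterthanOrder,
          PySem.List.pyGetD, PySem.List.pyGet?, PySem.List.pyIdx?, PySem.List.slice, PySem.List.clampIdx,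
          PySem.Dict.contains, PySem.Dict.get?, List.find?, hA2, Ne.symm hA2, hB2, Ne.symm hB2, hC2, Ne.symm hC2, hD2, Ne.symm hD2, hE2, Ne.symm hE2, hQ2, Ne.symm hQ2]
  rcases eq_or_ne q1 "?" with rfl | hQ1
  · rcases eq_or_ne q2 "A" with rfl | hA2
    · decide
    rcases eq_or_ne q2 "B" with rfl | hB2
    · decide
    rcases eq_or_ne q2 "C" with rfl | hC2
    · decide
    rcases eq_or_ne q2 "D" with rfl | hD2
    · decide
    rcases eq_or_ne q2 "E" with rfl | hE2
    · decide
    rcases eq_or_ne q2 "?" with rfl | hQ2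
    · decide
    simp [betterthan, betterthanLoop, betterthanQuals, betterthan_alt, betterthanOrder,
          PySem.List.pyGetD, PySem.List.pyGet?, PySem.List.pyIdx?, PySem.List.slice, PySem.List.clampIdx,
          PySem.Dict.contains, PySem.Dict.get?, List.find?, hA2, Ne.symm hA2, hB2, Ne.symm hB2, hC2, Ne.symm hC2, hD2, Ne.symm hD2, hE2, Ne.symm hE2, hQ2, Ne.symm hQ2]
  simp [betterthan, betterthanLoop, betterthanQuals, betterthan_alt, betterthanOrder,
          PySem.List.pyGetD, PySem.List.pyGet?, PySem.List.pyIdx?, PySem.List.slice, PySem.List.clampIdx,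
          PySem.Dict.contains, PySem.Dict.get?, List.find?, hA1, Ne.symm hA1, hB1, Ne.symm hB1, hC1, Ne.symm hC1, hD1, Ne.symm hD1, hE1, Ne.symm hE1, hQ1, Ne.symm hQ1]

-- ===== VERDICT (by name: the statement is the Claim_ definition above) =====
theorem betterthan_spec : Claim_equal_betterthan := by
  intro q1 q2 _
  exact betterthan_eq q1 q2
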